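-- pv_equiv track=rewrite | github.com/Kianoosh76/DS-Course-Materials | 2_Sorting/Task7/task.py | func
-- ===== SOURCE A (Python) =====
-- def func(n , b , arr):
--     odd = 0
--     even = 0
--     cuts = []
--     for i in range(n - 1):
--         if (arr[i] % 2 != 0):
--             odd = odd + 1
--         else:
--             even = even + 1
--         if (odd == even):
--             cuts.append(abs(arr[i + 1] - arr[i]))
--     cuts.sort()
--     ans = 0
--     sum = 0
--     for i in cuts:
--         if (sum + i <= b):
--             sum = sum + i
--             ans = ans + 1
--     return ans
-- ===== SOURCE B (Python) =====
-- def func(n, b, arr):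
--     # single running balance instead of two counters; prefix sums + binary search
--     # instead of the greedy accumulation loop
--     bal = 0
--     cuts = []
--     for i in range(n - 1):
--         bal += 1 if arr[i] % 2 != 0 else -1
--         if bal == 0:
--             cuts.append(abs(arr[i + 1] - arr[i]))
--     cuts.sort()
--     prefix = []
--     total = 0
--     for c in cuts:
--         total += c
--         prefix.append(total)
--     lo, hi = 0, len(prefix)
--     while lo < hi:
--         mid = (lo + hi) // 2
--         if prefix[mid] <= b:
--             lo = mid + 1
--         else:
--             hi = mid
--     return lo
-- ===== Notes on version B (the rewrite author's own statement) =====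
-- stated objective: alternative
-- what changed: B replaces A's two parity counters by one signed running balance and replaces A's greedy accumulate-and-count loop over the sorted cuts by a prefix-sum array queried with a hand-written binary search (bisect_right) for the largest prefix affordable within b.
-- outside the precondition, e.g. on func(2, 10, [1]): A returns 0, B returns 0
import Mathlib
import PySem

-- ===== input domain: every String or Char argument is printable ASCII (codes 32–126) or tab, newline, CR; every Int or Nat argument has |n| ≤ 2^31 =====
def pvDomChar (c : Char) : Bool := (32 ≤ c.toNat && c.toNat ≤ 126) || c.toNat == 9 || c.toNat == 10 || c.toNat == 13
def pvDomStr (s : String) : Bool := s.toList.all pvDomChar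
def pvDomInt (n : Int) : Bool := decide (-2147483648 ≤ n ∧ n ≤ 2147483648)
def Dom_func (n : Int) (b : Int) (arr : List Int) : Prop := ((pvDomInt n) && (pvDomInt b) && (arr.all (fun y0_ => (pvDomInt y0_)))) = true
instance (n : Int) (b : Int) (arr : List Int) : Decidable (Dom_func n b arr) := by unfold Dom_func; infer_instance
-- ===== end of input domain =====

-- B keeps A's O(n) cut-collection pass but with a single signed balance, and answers
-- the budget question by prefix sums + binary search instead of A's greedy loop.

-- ===== PORT A =====
def funcStepA (arr : List Int) (st : Int × Int × List Int) (i : Int) : Int × Int × List Int :=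
  let x := PySem.List.pyGetD arr i 0
  let oe := if PySem.Int.mod x 2 ≠ 0 then (st.1 + 1, st.2.1) else (st.1, st.2.1 + 1)
  let cuts := if oe.1 = oe.2 then st.2.2 ++ [|PySem.List.pyGetD arr (i + 1) 0 - x|] else st.2.2
  (oe.1, oe.2, cuts)

def funcGreedyStep (b : Int) (st : Int × Int) (i : Int) : Int × Int :=
  if st.2 + i ≤ b then (st.1 + 1, st.2 + i) else st

def func (n : Int) (b : Int) (arr : List Int) : Int :=
  let s := (PySem.List.pyRange 0 (n - 1) 1).foldl (funcStepA arr) (0, 0, [])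
  let cuts := PySem.List.sorted s.2.2 (fun x => x) false
  (cuts.foldl (funcGreedyStep b) (0, 0)).1

-- ===== PORT B =====
def funcStepB (arr : List Int) (st : Int × List Int) (i : Int) : Int × List Int :=
  let bal := st.1 + (if PySem.Int.mod (PySem.List.pyGetD arr i 0) 2 ≠ 0 then 1 else -1)
  let cuts := if bal = 0 then st.2 ++ [|PySem.List.pyGetD arr (i + 1) 0 - PySem.List.pyGetD arr i 0|] else st.2
  (bal, cuts)

def funcPrefixStep (st : Int × List Int) (c : Int) : Int × List Int :=
  (st.1 + c, st.2 ++ [st.1 + c])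

def funcBSearchGo (pr : List Int) (b : Int) : Nat → Int → Int → Int
  | 0, lo, _ => lo
  | fuel + 1, lo, hi =>
    if lo < hi then
      let mid := PySem.Int.floordiv (lo + hi) 2
      if PySem.List.pyGetD pr mid 0 ≤ b then funcBSearchGo pr b fuel (mid + 1) hi
      else funcBSearchGo pr b fuel lo mid
    else lo

-- the while loop, with (hi - lo).toNat as fuel (each iteration shrinks hi - lo)
def funcBSearch (pr : List Int) (b : Int) (lo hi : Int) : Int :=
  funcBSearchGo pr b (hi - lo).toNat lo hi

def func_alt (n : Int) (b : Int) (arr : List Int) : Int :=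
  let s := (PySem.List.pyRange 0 (n - 1) 1).foldl (funcStepB arr) (0, [])
  let cuts := PySem.List.sorted s.2 (fun x => x) false
  let pr := (cuts.foldl funcPrefixStep (0, [])).2
  funcBSearch pr b 0 (pr.length : Int)

-- ===== PRECONDITION & SPEC =====
-- Pre_ excludes n > len(arr): there A's first loop in general raises IndexError
-- (reading arr[i] or arr[i+1] out of range); for n = len(arr)+1 A happens to return
-- when the parity balance never closes at the last index — those inputs are excluded
-- only to keep the guard a simple bound (both programs agree there anyway).
def Pre_func (n : Int) (b : Int) (arr : List Int) : Prop := n ≤ (arr.length : Int)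
instance (n : Int) (b : Int) (arr : List Int) : Decidable (Pre_func n b arr) := by unfold Pre_func; infer_instance
def pvWitness_func : Int × Int × List Int := (2, 3, [1, 2])

def Spec_func (n : Int) (b : Int) (arr : List Int) (out : Int) : Prop := out = func_alt n b arr
instance (n : Int) (b : Int) (arr : List Int) (out : Int) : Decidable (Spec_func n b arr out) := by unfold Spec_func; infer_instance

-- ===== CLAIM (what is proved, stated in full; the proofs are below) =====
def Claim_equal_func : Prop := ∀ (n : Int) (b : Int) (arr : List Int), Dom_func n b arr → Pre_func n b arr → Spec_func n b arr (func n b arr)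

-- ===== LEMMAS AND PROOFS =====

-- the cut-collection loops of A and B compute the same list (balance = odd - even)
theorem stepAB (arr : List Int) (odd even : Int) (cuts : List Int) (i : Int) :
    funcStepB arr (odd - even, cuts) i =
      ((funcStepA arr (odd, even, cuts) i).1 - (funcStepA arr (odd, even, cuts) i).2.1,
       (funcStepA arr (odd, even, cuts) i).2.2) := by
  simp only [funcStepA, funcStepB]
  by_cases hp : PySem.Int.mod (PySem.List.pyGetD arr i 0) 2 ≠ 0
  · rw [if_pos hp, if_pos hp]
    by_cases hz : odd + 1 = even
    · simp only [if_pos hz, if_pos (show odd - even + 1 = 0 by omega)]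
      refine Prod.ext ?_ rfl
      simp
      omega
    · simp only [if_neg hz, if_neg (show ¬ (odd - even + 1 = 0) by omega)]
      refine Prod.ext ?_ rfl
      simp
      omega
  · rw [if_neg hp, if_neg hp]
    by_cases hz : odd = even + 1
    · simp only [if_pos hz, if_pos (show odd - even + -1 = 0 by omega)]
      refine Prod.ext ?_ rfl
      simp
      omega
    · simp only [if_neg hz, if_neg (show ¬ (odd - even + -1 = 0) by omega)]
      refine Prod.ext ?_ rfl
      simp
      omega

theorem loopAB (arr : List Int) (l : List Int) : ∀ (odd even : Int) (cuts : List Int),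
    l.foldl (funcStepB arr) (odd - even, cuts) =
      ((l.foldl (funcStepA arr) (odd, even, cuts)).1 - (l.foldl (funcStepA arr) (odd, even, cuts)).2.1,
       (l.foldl (funcStepA arr) (odd, even, cuts)).2.2) := by
  induction l with
  | nil => intro odd even cuts; rfl
  | cons x t ih =>
      intro odd even cuts
      simp only [List.foldl_cons, stepAB arr odd even cuts x]
      exact ih _ _ _

theorem mem_ite_append {C : Prop} [Decidable C] {cuts : List Int} {v x : Int}
    (hx : x ∈ if C then cuts ++ [v] else cuts) : x ∈ cuts ∨ x = v := by
  split at hx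
  · rcases List.mem_append.1 hx with h1 | h1
    · exact Or.inl h1
    · exact Or.inr (List.mem_singleton.1 h1)
  · exact Or.inl hx

-- every cut is an absolute value, hence nonnegative
theorem cutsA_nonneg (arr : List Int) (l : List Int) : ∀ (odd even : Int) (cuts : List Int),
    (∀ x ∈ cuts, 0 ≤ x) → ∀ x ∈ (l.foldl (funcStepA arr) (odd, even, cuts)).2.2, 0 ≤ x := by
  induction l with
  | nil => intro odd even cuts h; exact h
  | cons i t ih =>
      intro odd even cuts h
      simp only [List.foldl_cons]
      refine ih _ _ _ ?_
      intro x hx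
      rcases mem_ite_append hx with h1 | h1
      · exact h x h1
      · subst h1; exact abs_nonneg _

-- prefix sums, mathematically
def prefixFrom (s : Int) : List Int → List Int
  | [] => []
  | c :: t => (s + c) :: prefixFrom (s + c) t

theorem prefixFold (L : List Int) : ∀ (s : Int) (acc : List Int),
    L.foldl funcPrefixStep (s, acc) = (s + L.sum, acc ++ prefixFrom s L) := by
  induction L with
  | nil => intro s acc; simp [prefixFrom]
  | cons c t ih =>
      intro s acc
      simp only [List.foldl_cons, funcPrefixStep, prefixFrom, ih, List.sum_cons]
      refine Prod.ext (by omega) (by simp)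

theorem prefix_ge (L : List Int) : ∀ (s : Int), (∀ x ∈ L, 0 ≤ x) →
    ∀ y ∈ prefixFrom s L, s ≤ y := by
  induction L with
  | nil => intro s _ y hy; simp [prefixFrom] at hy
  | cons c t ih =>
      intro s h y hy
      simp only [prefixFrom, List.mem_cons] at hy
      rcases hy with hy | hy
      · have := h c (by simp); omega
      · have h1 := ih (s + c) (fun x hx => h x (by simp [hx])) y hy
        have := h c (by simp); omega

theorem prefix_pairwise (L : List Int) : ∀ (s : Int), (∀ x ∈ L, 0 ≤ x) →
    (prefixFrom s L).Pairwise (· ≤ ·) := by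
  induction L with
  | nil => intro s _; simp [prefixFrom]
  | cons c t ih =>
      intro s h
      simp only [prefixFrom, List.pairwise_cons]
      exact ⟨fun y hy => prefix_ge t (s + c) (fun x hx => h x (by simp [hx])) y hy,
             ih (s + c) (fun x hx => h x (by simp [hx]))⟩

theorem greedy_stall (b : Int) (t : List Int) : ∀ (ans s : Int),
    (∀ i ∈ t, ¬ (s + i ≤ b)) → t.foldl (funcGreedyStep b) (ans, s) = (ans, s) := by
  induction t with
  | nil => intro ans s _; rfl
  | cons c t ih =>
      intro ans s h
      simp only [List.foldl_cons, funcGreedyStep, if_neg (h c (by simp))]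
      exact ih ans s (fun i hi => h i (by simp [hi]))

theorem greedy_count (b : Int) (L : List Int) : ∀ (ans s : Int),
    L.Pairwise (· ≤ ·) → (∀ x ∈ L, 0 ≤ x) →
    (L.foldl (funcGreedyStep b) (ans, s)).1 =
      ans + ((prefixFrom s L).countP (fun p => decide (p ≤ b)) : Int) := by
  induction L with
  | nil => intro ans s _ _; simp [prefixFrom]
  | cons c t ih =>
      intro ans s hp hn
      rcases List.pairwise_cons.1 hp with ⟨hc, hpt⟩
      by_cases hfit : s + c ≤ b
      · simp only [List.foldl_cons, funcGreedyStep, if_pos hfit, prefixFrom,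
          List.countP_cons, decide_eq_true_eq]
        rw [ih (ans + 1) (s + c) hpt (fun x hx => hn x (by simp [hx]))]
        simp
        omega
      · simp only [List.foldl_cons, funcGreedyStep, if_neg hfit, prefixFrom,
          List.countP_cons]
        rw [greedy_stall b t ans s (fun i hi => by have := hc i hi; omega)]
        have hz : (prefixFrom (s + c) t).countP (fun p => decide (p ≤ b)) = 0 := by
          rw [List.countP_eq_zero]
          intro y hy
          have := prefix_ge t (s + c) (fun x hx => hn x (by simp [hx])) y hy
          simp only [decide_eq_true_eq]
          omega
        simp [hfit, hz]

-- counting the entries ≤ b when they form a clean split at position c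
theorem countP_split (b : Int) (P : List Int) (c : Nat) (hc : c ≤ P.length)
    (hlow : ∀ j : Nat, j < c → P.getD j 0 ≤ b)
    (hhigh : ∀ j : Nat, c ≤ j → j < P.length → ¬ (P.getD j 0 ≤ b)) :
    P.countP (fun p => decide (p ≤ b)) = c := by
  have hsplit : P = P.take c ++ P.drop c := (List.take_append_drop c P).symm
  rw [hsplit, List.countP_append]
  have h1 : (P.take c).countP (fun p => decide (p ≤ b)) = c := by
    rw [List.countP_eq_length.2, List.length_take_of_le hc]
    intro a ha
    rcases List.mem_iff_getElem.1 ha with ⟨j, hj, rfl⟩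
    have hjc : j < c := by simpa using hj.trans_le (List.length_take_le c P)
    have hjP : j < P.length := lt_of_lt_of_le hjc hc
    have := hlow j hjc
    rw [List.getElem_take]
    simpa [List.getD_eq_getElem?_getD, List.getElem?_eq_getElem hjP] using this
  have h2 : (P.drop c).countP (fun p => decide (p ≤ b)) = 0 := by
    rw [List.countP_eq_zero]
    intro a ha
    rcases List.mem_iff_getElem.1 ha with ⟨j, hj, rfl⟩
    have hjP : c + j < P.length := by
      have h' := hj
      rw [List.length_drop] at h'
      omega
    have := hhigh (c + j) (Nat.le_add_right _ _) hjP
    rw [List.getElem_drop]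
    simpa [List.getD_eq_getElem?_getD, List.getElem?_eq_getElem hjP] using this
  omega

theorem pairwise_getD_mono (P : List Int) (hP : P.Pairwise (· ≤ ·))
    (j k : Nat) (hjk : j ≤ k) (hk : k < P.length) : P.getD j 0 ≤ P.getD k 0 := by
  have hj : j < P.length := lt_of_le_of_lt hjk hk
  rw [List.getD_eq_getElem?_getD, List.getD_eq_getElem?_getD,
    List.getElem?_eq_getElem hj, List.getElem?_eq_getElem hk]
  rcases Nat.lt_or_ge j k with h | h
  · exact List.pairwise_iff_getElem.1 hP j k hj hk h
  · have : j = k := le_antisymm hjk h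
    subst this; simp

theorem bsearchGo_eq (P : List Int) (b : Int) (hP : P.Pairwise (· ≤ ·)) :
    ∀ (fuel : Nat) (lo hi : Int), (hi - lo).toNat ≤ fuel → 0 ≤ lo → lo ≤ hi → hi ≤ (P.length : Int) →
    (∀ j : Nat, (j : Int) < lo → P.getD j 0 ≤ b) →
    (∀ j : Nat, hi ≤ (j : Int) → j < P.length → ¬ (P.getD j 0 ≤ b)) →
    funcBSearchGo P b fuel lo hi = (P.countP (fun p => decide (p ≤ b)) : Int) := by
  intro fuel
  induction fuel with
  | zero =>
      intro lo hi hk h0 hlh hhl hlow hhigh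
      have hle : lo = hi := by omega
      rw [funcBSearchGo]
      subst hle
      have := countP_split b P lo.toNat (by omega)
        (fun j hj => hlow j (by omega))
        (fun j hj hjl => hhigh j (by omega) hjl)
      omega
  | succ fuel IH =>
    intro lo hi hk h0 hlh hhl hlow hhigh
    rw [funcBSearchGo]
    by_cases h : lo < hi
    · have hb := PySem.Int.floordiv_two_mid_bounds (lo := lo) (hi := hi) (le_of_lt h)
      have hs : PySem.Int.floordiv (lo + hi) 2 < hi :=
        (PySem.Int.floordiv_lt_iff_lt_mul (by omega)).mpr (by omega)
      rw [if_pos h]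
      set mid := PySem.Int.floordiv (lo + hi) 2 with hmid
      have hmid0 : 0 ≤ mid := by omega
      have hmidlen : mid < (P.length : Int) := by omega
      have hget : PySem.List.pyGetD P mid 0 = P.getD mid.toNat 0 := by
        have h1 := PySem.List.pyGetD_eq_getElem (xs := P) (i := mid) (d := (0:Int)) hmid0 hmidlen
        rw [h1, List.getD_eq_getElem?_getD, List.getElem?_eq_getElem (by omega)]
        rfl
      by_cases hcmp : PySem.List.pyGetD P mid 0 ≤ b
      · rw [if_pos hcmp]
        refine IH (mid + 1) hi (by omega) (by omega) (by omega) hhl ?_ hhigh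
        intro j hj
        rcases Nat.lt_or_ge j lo.toNat with hjlo | hjlo
        · exact hlow j (by omega)
        · have : P.getD j 0 ≤ P.getD mid.toNat 0 :=
            pairwise_getD_mono P hP j mid.toNat (by omega) (by omega)
          rw [hget] at hcmp
          omega
      · rw [if_neg hcmp]
        refine IH lo mid (by omega) h0 (by omega) (by omega) hlow ?_
        intro j hj hjlen
        have : P.getD mid.toNat 0 ≤ P.getD j 0 :=
          pairwise_getD_mono P hP mid.toNat j (by omega) hjlen
        rw [hget] at hcmp
        omega
    · rw [if_neg h]
      have hle : lo = hi := by omega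
      subst hle
      have := countP_split b P lo.toNat (by omega)
        (fun j hj => hlow j (by omega))
        (fun j hj hjl => hhigh j (by omega) hjl)
      omega

-- ===== VERDICT (by name: the statement is the Claim_ definition above) =====
theorem func_spec : Claim_equal_func := by
  intro n b arr _ _
  unfold Spec_func func func_alt
  simp only
  have hAB := loopAB arr (PySem.List.pyRange 0 (n - 1) 1) 0 0 []
  rw [show (0 : Int) - 0 = 0 by norm_num] at hAB
  set rA := (PySem.List.pyRange 0 (n - 1) 1).foldl (funcStepA arr) (0, 0, []) with hrA
  have hcuts : ((PySem.List.pyRange 0 (n - 1) 1).foldl (funcStepB arr) (0, [])).2 = rA.2.2 := by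
    rw [hAB]
  rw [hcuts]
  set L := PySem.List.sorted rA.2.2 (fun x => x) false with hL
  have hnn : ∀ x ∈ L, 0 ≤ x := by
    intro x hx
    have hx' : x ∈ rA.2.2 := (PySem.List.mem_sorted _ _ _ _).1 hx
    exact cutsA_nonneg arr (PySem.List.pyRange 0 (n - 1) 1) 0 0 [] (by simp) x hx'
  have hpw : L.Pairwise (· ≤ ·) := by
    simpa using PySem.List.sorted_pairwise (xs := rA.2.2) (key := fun x => x)
  rw [prefixFold L 0 []]
  simp only [List.nil_append]
  have hg := greedy_count b L 0 0 hpw hnn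
  have hpp : (prefixFrom 0 L).Pairwise (· ≤ ·) := prefix_pairwise L 0 hnn
  have hpfx0 : ∀ x ∈ L, (0:Int) ≤ x := hnn
  have hbs := bsearchGo_eq (prefixFrom 0 L) b hpp (((prefixFrom 0 L).length : Int) - 0).toNat 0
      ((prefixFrom 0 L).length : Int) (le_refl _) (by omega)
      (by exact_mod_cast Int.natCast_nonneg _) (le_refl _)
      (fun j hj => absurd hj (by omega))
      (fun j hj hjl => absurd hjl (by omega))
  rw [funcBSearch, hbs, hg]
  omega
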